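-- pv_equiv track=rewrite | github.com/1live-1chance/python-educational-projects | binomial_theorem.py | binomial_theorem
-- ===== SOURCE A (Python) =====
-- def factorial(n):
--     """Вычисляет факториал числа n рекурсивно."""
--     return n * factorial(n - 1) if n != 0 else 1
--
-- def binomial_coefficient(n, k):
--     """
--     Вычисляет биномиальный коэффициент C(n, k) = n! / (k! * (n - k)!).
--
--     Args:
--         n: Общее количество элементов
--         k: Количество выбираемых элементов
--
--     Returns:
--         Биномиальный коэффициент
--     """
--     numerator = factorial(n)
--     denominator = factorial(k) * factorial(n - k)
--     return numerator // denominator  # Используем целочисленное деление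
--
-- def binomial_theorem(n, a, b):
--     """
--     Раскрывает бином (a + b)^n по формуле бинома Ньютона.
--
--     Args:
--         n: Степень бинома
--         a: Первый член бинома
--         b: Второй член бинома
--
--     Returns:
--         Сумма всех членов разложения
--     """
--     terms = []
--     for k in range(n + 1):
--         coeff = binomial_coefficient(n, k)
--         a_power = n - k
--         b_power = k
--         term = coeff * (a ** a_power) * (b ** b_power)
--         terms.append(term)
--     return sum(terms)
-- ===== SOURCE B (Python) =====
-- def binomial_theorem(n, a, b):
--     """Expand (a+b)**n: single pass with incremental Pascal-style coefficients."""
--     total = 0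
--     coeff = 1
--     for k in range(n + 1):
--         total += coeff * a ** (n - k) * b ** k
--         coeff = coeff * (n - k) // (k + 1)
--     return total
-- ===== Notes on version B (the rewrite author's own statement) =====
-- stated objective: faster
-- what changed: Replaces per-term recursive-factorial binomial coefficients with an O(n) single pass that updates the coefficient incrementally via the Pascal ratio recurrence C(n,k+1) = C(n,k)*(n-k)//(k+1), accumulating the sum instead of building a list.
import Mathlib
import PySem

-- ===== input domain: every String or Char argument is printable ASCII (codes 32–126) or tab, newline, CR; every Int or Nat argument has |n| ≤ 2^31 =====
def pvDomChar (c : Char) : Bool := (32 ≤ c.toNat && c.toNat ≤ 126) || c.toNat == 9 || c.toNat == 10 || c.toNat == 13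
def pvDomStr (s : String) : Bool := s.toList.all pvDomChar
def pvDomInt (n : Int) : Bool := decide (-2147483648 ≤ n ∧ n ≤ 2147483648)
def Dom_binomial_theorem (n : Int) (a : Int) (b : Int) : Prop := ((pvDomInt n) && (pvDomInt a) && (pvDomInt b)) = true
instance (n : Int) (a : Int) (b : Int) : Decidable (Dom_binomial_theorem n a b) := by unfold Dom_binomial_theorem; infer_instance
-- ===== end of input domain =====

-- B replaces A's per-term recursive-factorial coefficients by one O(n) pass with the
-- Pascal ratio recurrence C(n,k+1) = C(n,k)*(n-k)//(k+1) (objective: faster).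

-- ===== PORT A =====
-- 'return n * factorial(n - 1) if n != 0 else 1', recursion counted on n.toNat:
-- exact for n ≥ 0, the only arguments binomial_theorem ever passes (Python's
-- factorial does not terminate for negative n, and none occurs here).
def pyFactorialNat : Nat → Int
  | 0 => 1
  | p + 1 => ((p + 1 : Nat) : Int) * pyFactorialNat p

def pyFactorial (n : Int) : Int := pyFactorialNat n.toNat

def binomial_coefficient (n : Int) (k : Int) : Int :=
  PySem.Int.floordiv (pyFactorial n) (pyFactorial k * pyFactorial (n - k))

-- 'a ** p' with p = n-k ≥ 0 and p = k ≥ 0 inside the loop: ported as ^ on .toNat,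
-- exact since every exponent reached is nonnegative.
def binomial_theorem (n : Int) (a : Int) (b : Int) : Int :=
  ((PySem.List.pyRange 0 (n + 1) 1).foldl
      (fun terms k =>
        terms ++ [binomial_coefficient n k * a ^ (n - k).toNat * b ^ k.toNat]) []).sum

-- ===== PORT B =====
def binomial_theorem_alt (n : Int) (a : Int) (b : Int) : Int :=
  ((PySem.List.pyRange 0 (n + 1) 1).foldl
      (fun (s : Int × Int) k =>
        (s.1 + s.2 * a ^ (n - k).toNat * b ^ k.toNat,
         PySem.Int.floordiv (s.2 * (n - k)) (k + 1))) (0, 1)).1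

-- ===== PRECONDITION & SPEC =====
-- Pre_ excludes exactly the inputs on which the Python A RAISES: for n ≥ 996 A's
-- recursive factorial exceeds CPython's default recursion limit and raises
-- RecursionError (threshold measured in this environment); A returns on all other
-- inputs of the domain, and they are all admitted.
def Pre_binomial_theorem (n : Int) (a : Int) (b : Int) : Prop := n ≤ 995
instance (n : Int) (a : Int) (b : Int) : Decidable (Pre_binomial_theorem n a b) := by unfold Pre_binomial_theorem; infer_instance
def pvWitness_binomial_theorem : Int × Int × Int := (5, 2, 3)

def Spec_binomial_theorem (n : Int) (a : Int) (b : Int) (out : Int) : Prop := out = binomial_theorem_alt n a b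
instance (n : Int) (a : Int) (b : Int) (out : Int) : Decidable (Spec_binomial_theorem n a b out) := by unfold Spec_binomial_theorem; infer_instance

-- ===== CLAIM (what is proved, stated in full; the proofs are below) =====
def Claim_equal_binomial_theorem : Prop := ∀ (n : Int) (a : Int) (b : Int), Dom_binomial_theorem n a b → Pre_binomial_theorem n a b → Spec_binomial_theorem n a b (binomial_theorem n a b)

-- ===== LEMMAS AND PROOFS =====

theorem pyFactorialNat_eq (m : Nat) : pyFactorialNat m = (m.factorial : Int) := by
  induction m with
  | zero => simp [pyFactorialNat, Nat.factorial]
  | succ p ih =>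
    simp only [pyFactorialNat, Nat.factorial, ih]
    push_cast
    ring

theorem binom_coeff_eq (m k : Nat) (h : k ≤ m) :
    binomial_coefficient (m : Int) (k : Int) = (m.choose k : Int) := by
  have h2 : ((m : Int) - (k : Int)).toNat = m - k := by omega
  unfold binomial_coefficient pyFactorial
  rw [h2]
  simp only [Int.toNat_natCast, pyFactorialNat_eq, ← Nat.cast_mul,
    PySem.Int.floordiv_natCast]
  rw [Nat.choose_eq_factorial_div_factorial h]

theorem coeff_step (m k : Nat) (h : k ≤ m) (c : Int) (hc : c = (m.choose k : Int)) :
    PySem.Int.floordiv (c * ((m : Int) - (k : Int))) ((k : Int) + 1)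
      = (m.choose (k + 1) : Int) := by
  have h2 : ((m : Int) - (k : Int)) = ((m - k : Nat) : Int) := by omega
  rw [hc, h2, ← Nat.cast_mul, show ((k : Int) + 1) = ((k + 1 : Nat) : Int) by push_cast; ring,
    PySem.Int.floordiv_natCast, ← Nat.choose_succ_right_eq,
    Nat.mul_div_cancel _ (Nat.succ_pos k)]

-- the common term
def pvTerm (m : Nat) (a b : Int) (k : Nat) : Int :=
  (m.choose k : Int) * a ^ (m - k) * b ^ k

theorem loopB (m : Nat) (a b : Int) (j : Nat) (hj : j ≤ m + 1) :
    (PySem.List.pyRange 0 (j : Int) 1).foldl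
      (fun (s : Int × Int) k =>
        (s.1 + s.2 * a ^ ((m : Int) - k).toNat * b ^ k.toNat,
         PySem.Int.floordiv (s.2 * ((m : Int) - k)) (k + 1))) (0, 1)
    = (((List.range j).map (pvTerm m a b)).sum, (m.choose j : Int)) := by
  induction j with
  | zero => simp [PySem.List.pyRange_one_eq_nil]
  | succ j ih =>
    have hj' : j ≤ m := by omega
    rw [show ((j + 1 : Nat) : Int) = (j : Int) + 1 by push_cast; ring,
      PySem.List.pyRange_one_succ_right (by positivity), List.foldl_append,
      ih (by omega)]
    simp only [List.foldl_cons, List.foldl_nil, List.range_succ, List.map_append,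
      List.sum_append, List.map_cons, List.map_nil, List.sum_cons, List.sum_nil,
      Prod.mk.injEq]
    constructor
    · have e1 : ((m : Int) - (j : Int)).toNat = m - j := by omega
      have e2 : ((j : Int)).toNat = j := Int.toNat_natCast j
      rw [e1, e2]; simp [pvTerm]
    · exact coeff_step m j hj' _ rfl

theorem loopA (m : Nat) (a b : Int) :
    binomial_theorem (m : Int) a b = ((List.range (m + 1)).map (pvTerm m a b)).sum := by
  unfold binomial_theorem
  rw [PySem.List.foldl_append_singleton_eq_map]
  congr 1
  rw [show ((m : Int) + 1) = ((m + 1 : Nat) : Int) by push_cast; ring,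
    PySem.List.pyRange_one]
  simp only [Int.sub_zero, Int.toNat_natCast, zero_add, List.map_map, List.nil_append]
  refine List.map_congr_left (fun k hk => ?_)
  have hk' : k ≤ m := by simpa [Nat.lt_succ_iff] using List.mem_range.mp hk
  have e1 : ((m : Int) - (k : Int)).toNat = m - k := by omega
  simp only [Function.comp_apply, pvTerm, e1, Int.toNat_natCast,
    binom_coeff_eq m k hk']

-- ===== VERDICT (by name: the statement is the Claim_ definition above) =====
theorem binomial_theorem_spec : Claim_equal_binomial_theorem := by
  intro n a b _ _
  unfold Spec_binomial_theorem
  by_cases hn : 0 ≤ n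
  · obtain ⟨m, rfl⟩ : ∃ m : Nat, n = (m : Int) := ⟨n.toNat, (Int.toNat_of_nonneg hn).symm⟩
    rw [loopA]
    unfold binomial_theorem_alt
    rw [show ((m : Int) + 1) = ((m + 1 : Nat) : Int) by push_cast; ring,
      loopB m a b (m + 1) le_rfl]
  · unfold binomial_theorem binomial_theorem_alt
    rw [PySem.List.pyRange_one_eq_nil (by omega)]
    simp
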